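-- pv_equiv track=rewrite | github.com/coelacant1/PTXEngine | scripts/UpdatePTXRegistry.py | _strip_leading_attributes
-- ===== SOURCE A (Python) =====
-- def _strip_leading_attributes(expr: str) -> str:
--     out = expr.strip()
--     while out.startswith('[['):
--         end = out.find(']]')
--         if end == -1:
--             break
--         out = out[end + 2 :].lstrip()
--     return out
-- ===== SOURCE B (Python) =====
-- def _strip_leading_attributes(expr: str) -> str:
--     # Index-based single pass: compute the cut position, slice once at the end
--     # (A repeatedly re-slices the string inside its loop).
--     s = expr.strip()
--     n = len(s)
--     i = 0
--     while i + 1 < n and s[i] == '[' and s[i + 1] == '[':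
--         j = s.find(']]', i)
--         if j == -1:
--             break
--         i = j + 2
--         while i < n and s[i].isspace():
--             i += 1
--     return s[i:]
-- ===== Notes on version B (the rewrite author's own statement) =====
-- stated objective: alternative
-- what changed: Replaces A's loop of repeated slicing (out = out[end+2:].lstrip() each iteration) with a single index-based scan that only advances a cursor i and slices once at the end.
import Mathlib
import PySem

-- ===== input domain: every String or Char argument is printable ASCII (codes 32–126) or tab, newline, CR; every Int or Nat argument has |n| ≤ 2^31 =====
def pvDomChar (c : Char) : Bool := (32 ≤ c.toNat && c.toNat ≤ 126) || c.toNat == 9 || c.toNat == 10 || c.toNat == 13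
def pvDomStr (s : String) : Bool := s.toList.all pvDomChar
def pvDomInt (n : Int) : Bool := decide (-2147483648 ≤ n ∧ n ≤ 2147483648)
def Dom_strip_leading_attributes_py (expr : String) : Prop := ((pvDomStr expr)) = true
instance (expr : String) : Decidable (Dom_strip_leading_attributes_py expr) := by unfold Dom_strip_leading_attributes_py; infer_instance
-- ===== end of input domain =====

-- B replaces A's repeated slice-and-lstrip loop by a single cursor scan with one final slice (alternative decomposition).

-- ===== PORT A =====
-- the while loop of A: state is `out`, re-sliced each iteration
def stripALoop (out : List Char) : List Char :=
  if _h1 : PySem.Chars.startswith out ['[', '['] = true then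
    if h2 : PySem.Chars.find out [']', ']'] = -1 then out
    else
      -- out = out[end + 2 :].lstrip()
      stripALoop (PySem.Chars.lstrip
        (PySem.List.slice out (some (PySem.Chars.find out [']', ']'] + 2)) none))
  else out
termination_by out.length
decreasing_by
  have hpre : ['[', '['] <+: out := (PySem.Chars.startswith_iff _ _).mp _h1
  have hlen2 : 2 ≤ out.length := by
    have := hpre.length_le; simpa using this
  have hnn : 0 ≤ PySem.Chars.find out [']', ']'] := by
    have := PySem.Chars.neg_one_le_find out [']', ']']
    omega
  have hsl : PySem.List.slice out (some (PySem.Chars.find out [']', ']'] + 2)) none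
      = List.drop (PySem.Chars.find out [']', ']'] + 2).toNat out :=
    PySem.List.slice_from out (by omega)
  have hls : (PySem.Chars.lstrip (List.drop (PySem.Chars.find out [']', ']'] + 2).toNat out)).length
      ≤ (List.drop (PySem.Chars.find out [']', ']'] + 2).toNat out).length :=
    List.length_dropWhile_le _ _
  have hdl : (List.drop (PySem.Chars.find out [']', ']'] + 2).toNat out).length
      = out.length - (PySem.Chars.find out [']', ']'] + 2).toNat := List.length_drop ..
  have : 2 ≤ (PySem.Chars.find out [']', ']'] + 2).toNat := by omega
  rw [hsl]; omega

def strip_leading_attributes_py (expr : String) : String :=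
  String.mk (stripALoop (PySem.Chars.strip expr.toList))

-- ===== PORT B =====
-- the inner `while i < n and s[i].isspace(): i += 1`
def skipWsB (l : List Char) (i : Nat) : Nat :=
  if h : i < l.length then
    if PySem.Chars.isspace l[i] then skipWsB l (i + 1) else i
  else i
termination_by l.length - i

theorem skipWsB_ge (l : List Char) (i : Nat) : i ≤ skipWsB l i := by
  unfold skipWsB
  split
  · split
    · exact le_trans (by omega) (skipWsB_ge l (i + 1))
    · exact le_refl i
  · exact le_refl i
termination_by l.length - i

-- the outer while loop of B: only the cursor i moves
def bLoop (l : List Char) (i : Nat) : Nat :=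
  if h : i + 1 < l.length then
    if l[i]'(by omega) = '[' ∧ l[i + 1]'h = '[' then
      if hj : PySem.Chars.findFrom l [']', ']'] (↑i) none = -1 then i
      else
        bLoop l (skipWsB l ((PySem.Chars.findFrom l [']', ']'] (↑i) none).toNat + 2))
    else i
  else i
termination_by l.length + 1 - i
decreasing_by
  have hk : i ≤ l.length := by omega
  have hspec := PySem.Chars.findFrom_natCast_spec l [']', ']'] i hk hj
  have hge := skipWsB_ge l ((PySem.Chars.findFrom l [']', ']'] (↑i) none).toNat + 2)
  omega

def strip_leading_attributes_py_alt (expr : String) : String :=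
  let s := PySem.Chars.strip expr.toList
  -- s[i:] with 0 ≤ i ≤ len(s) is List.drop i
  String.mk (s.drop (bLoop s 0))

-- ===== PRECONDITION & SPEC =====
def Spec_strip_leading_attributes_py (expr : String) (out : String) : Prop := out = strip_leading_attributes_py_alt expr
instance (expr : String) (out : String) : Decidable (Spec_strip_leading_attributes_py expr out) := by unfold Spec_strip_leading_attributes_py; infer_instance

-- ===== CLAIM (what is proved, stated in full; the proofs are below) =====
def Claim_equal_strip_leading_attributes_py : Prop := ∀ (expr : String), Dom_strip_leading_attributes_py expr → Spec_strip_leading_attributes_py expr (strip_leading_attributes_py expr)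

-- ===== LEMMAS AND PROOFS =====

theorem skipWsB_le (l : List Char) (i : Nat) (h : i ≤ l.length) : skipWsB l i ≤ l.length := by
  unfold skipWsB
  split
  · split
    · exact skipWsB_le l (i + 1) (by omega)
    · omega
  · omega
termination_by l.length - i

-- lstrip of a suffix = dropping up to the first non-space, as B's inner loop computes
theorem lstrip_drop_eq (l : List Char) (k : Nat) :
    PySem.Chars.lstrip (l.drop k) = l.drop (skipWsB l k) := by
  unfold skipWsB
  split
  · next h =>
    rw [List.drop_eq_getElem_cons h]
    by_cases hs : PySem.Chars.isspace l[k] = true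
    · rw [if_pos hs]
      have := lstrip_drop_eq l (k + 1)
      simpa [PySem.Chars.lstrip, List.dropWhile, hs] using this
    · rw [if_neg hs]
      simp [PySem.Chars.lstrip, List.dropWhile, hs, ← List.drop_eq_getElem_cons h]
  · next h =>
    rw [List.drop_eq_nil_of_le (by omega : l.length ≤ k)]
    simp [PySem.Chars.lstrip]
termination_by l.length - k

-- startswith '[[' on a suffix, characterised by two indexed characters
theorem startswith_drop_iff (l : List Char) (i : Nat) (h : i + 1 < l.length) :
    PySem.Chars.startswith (l.drop i) ['[', '['] = true ↔
      (l[i]'(by omega) = '[' ∧ l[i + 1]'h = '[') := by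
  rw [List.drop_eq_getElem_cons (show i < l.length by omega),
      List.drop_eq_getElem_cons (show i + 1 < l.length from h)]
  simp only [PySem.Chars.startswith_iff]
  constructor
  · intro hpre
    rcases hpre with ⟨t, ht⟩
    simp only [List.cons_append, List.nil_append, List.cons.injEq] at ht
    exact ⟨ht.1.symm, ht.2.1.symm⟩
  · rintro ⟨h1, h2⟩
    exact ⟨List.drop (i + 1 + 1) l, by simp [h1, h2]⟩

theorem main_loop (l : List Char) (i : Nat) (hi : i ≤ l.length) :
    stripALoop (l.drop i) = l.drop (bLoop l i) := by
  rw [bLoop]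
  split
  · next h =>
    split
    · next hc =>
      have hsw : PySem.Chars.startswith (l.drop i) ['[', '['] = true :=
        (startswith_drop_iff l i h).mpr hc
      have hkf := PySem.Chars.findFrom_natCast l [']', ']'] i (by omega)
      by_cases hfind : PySem.Chars.find (l.drop i) [']', ']'] = -1
      · have hjeq : PySem.Chars.findFrom l [']', ']'] (↑i) none = -1 := by
          rw [hkf, if_pos hfind]
        rw [dif_pos hjeq, stripALoop, dif_pos hsw, dif_pos hfind]
      · have hnn : 0 ≤ PySem.Chars.find (l.drop i) [']', ']'] := by
          have := PySem.Chars.neg_one_le_find (l.drop i) [']', ']']; omega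
        have hjne : ¬ PySem.Chars.findFrom l [']', ']'] (↑i) none = -1 := by
          rw [hkf, if_neg hfind]; intro h0; omega
        rw [dif_neg hjne, stripALoop, dif_pos hsw, dif_neg hfind]
        set e := PySem.Chars.find (l.drop i) [']', ']'] with he
        have hsl : PySem.List.slice (l.drop i) (some (e + 2)) none = (l.drop i).drop (e + 2).toNat :=
          PySem.List.slice_from _ (by omega)
        have hj2 : (PySem.Chars.findFrom l [']', ']'] (↑i) none).toNat = i + e.toNat := by
          rw [hkf, if_neg hfind]; omega
        have hbound : i + e.toNat + 2 ≤ l.length := by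
          have hspec := (PySem.Chars.find_spec hnn).1
          have hl := hspec.length_le
          simp [List.length_drop] at hl
          omega
        rw [hsl, List.drop_drop, lstrip_drop_eq, hj2]
        have harg : i + (e + 2).toNat = i + e.toNat + 2 := by omega
        rw [harg]
        exact main_loop l (skipWsB l (i + e.toNat + 2))
          (skipWsB_le l _ hbound)
    · next hc =>
      have hsw : ¬ PySem.Chars.startswith (l.drop i) ['[', '['] = true := by
        rw [startswith_drop_iff l i h]; exact hc
      rw [stripALoop, dif_neg hsw]
  · next h =>
    have hsw : ¬ PySem.Chars.startswith (l.drop i) ['[', '['] = true := by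
      rw [PySem.Chars.startswith_iff]
      intro hpre
      have := hpre.length_le
      simp [List.length_drop] at this
      omega
    rw [stripALoop, dif_neg hsw]
termination_by l.length + 1 - i
decreasing_by
  have hge := skipWsB_ge l (i + (PySem.Chars.find (List.drop i l) [']', ']']).toNat + 2)
  omega

-- ===== VERDICT (by name: the statement is the Claim_ definition above) =====
theorem strip_leading_attributes_py_spec : Claim_equal_strip_leading_attributes_py := by
  intro expr _
  unfold Spec_strip_leading_attributes_py strip_leading_attributes_py strip_leading_attributes_py_alt
  exact congrArg String.mk (by simpa using main_loop (PySem.Chars.strip expr.toList) 0 (Nat.zero_le _))
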